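-- pv_equiv track=rewrite | github.com/ddmms/ml-peg | ml_peg/app/build_app.py | _framework_to_path
-- ===== SOURCE A (Python) =====
-- def _framework_to_path(framework_id: str) -> str:
--     """
--     Convert a framework identifier to a stable URL path.
--
--     Parameters
--     ----------
--     framework_id
--         Framework identifier to convert.
--
--     Returns
--     -------
--     str
--         URL path corresponding to framework.
--     """
--     slug = "".join(
--         character.lower() if character.isalnum() else "-" for character in framework_id
--     )
--     slug = "-".join(part for part in slug.split("-") if part)
--     if not slug:
--         raise ValueError(f"Unable to construct path for framework {framework_id}")
--     return f"/framework/{slug}"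
-- ===== SOURCE B (Python) =====
-- def _framework_to_path(framework_id: str) -> str:
--     # Single grouping pass: accumulate runs of alnum chars (lowercased) into a
--     # buffer, flush the buffer into `parts` at each non-alnum char and at the end.
--     parts = []
--     buf = []
--     for character in framework_id:
--         if character.isalnum():
--             buf.append(character.lower())
--         else:
--             if buf:
--                 parts.append("".join(buf))
--                 buf = []
--     if buf:
--         parts.append("".join(buf))
--     if not parts:
--         raise ValueError(f"Unable to construct path for framework {framework_id}")
--     return f"/framework/{'-'.join(parts)}"
-- ===== Notes on version B (the rewrite author's own statement) =====
-- stated objective: alternative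
-- what changed: Replaces A's build-a-dashed-string-then-split/filter/join pipeline with a single grouping pass that accumulates runs of alnum characters into a buffer and flushes it into a parts list at separators and at the end.
import Mathlib
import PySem

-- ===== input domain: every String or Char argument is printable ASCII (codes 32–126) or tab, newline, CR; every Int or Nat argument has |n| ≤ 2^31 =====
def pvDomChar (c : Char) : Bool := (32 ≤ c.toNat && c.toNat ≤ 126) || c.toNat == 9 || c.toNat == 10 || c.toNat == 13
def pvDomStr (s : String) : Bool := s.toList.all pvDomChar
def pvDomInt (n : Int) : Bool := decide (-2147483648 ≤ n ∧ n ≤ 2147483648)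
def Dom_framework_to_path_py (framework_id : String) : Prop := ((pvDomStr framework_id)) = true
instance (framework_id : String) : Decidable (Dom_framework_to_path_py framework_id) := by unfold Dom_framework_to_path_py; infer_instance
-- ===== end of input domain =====

-- B replaces A's build-dashed-string-then-split/filter/join pipeline with a single
-- grouping pass over the characters (alternative decomposition, same cost).


-- ===== PORT A =====
-- slug = "".join(c.lower() if c.isalnum() else "-" for c in framework_id)
-- slug = "-".join(part for part in slug.split("-") if part)
-- if not slug: raise ValueError(...)  -- excluded by Pre_
-- return f"/framework/{slug}"
def framework_to_path_py (framework_id : String) : String :=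
  let slug : List Char :=
    framework_id.toList.map
      (fun c => if PySem.Chars.isalnum c then PySem.Chars.lowerChar c else '-')
  let slug2 : List Char :=
    PySem.Chars.join ['-']
      ((PySem.Chars.splitOn slug ['-']).filter (fun p => decide (p ≠ [])))
  if slug2 = [] then ""  -- Python raises ValueError here (outside Pre_)
  else String.mk ("/framework/".toList ++ slug2)

-- ===== PORT B =====
-- one grouping pass: state = (parts, buf); flush buf at non-alnum chars and at the end
def framework_to_path_py_alt (framework_id : String) : String :=
  let st : List (List Char) × List Char :=
    framework_id.toList.foldl
      (fun (st : List (List Char) × List Char) c =>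
        if PySem.Chars.isalnum c then (st.1, st.2 ++ [PySem.Chars.lowerChar c])
        else if st.2 = [] then (st.1, []) else (st.1 ++ [st.2], []))
      ([], [])
  let parts : List (List Char) := if st.2 = [] then st.1 else st.1 ++ [st.2]
  if parts = [] then ""  -- Python raises ValueError here (outside Pre_)
  else String.mk ("/framework/".toList ++ PySem.Chars.join ['-'] parts)

-- ===== PRECONDITION & SPEC =====
-- Pre_ excludes exactly the inputs with no alphanumeric character, on which A
-- (and B) raise ValueError instead of returning.
def Pre_framework_to_path_py (framework_id : String) : Prop :=
  framework_id.toList.any (fun c => PySem.Chars.isalnum c) = true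
instance (framework_id : String) : Decidable (Pre_framework_to_path_py framework_id) := by
  unfold Pre_framework_to_path_py; infer_instance
def pvWitness_framework_to_path_py : String := "mace-mp-0"

def Spec_framework_to_path_py (framework_id : String) (out : String) : Prop :=
  out = framework_to_path_py_alt framework_id
instance (framework_id : String) (out : String) : Decidable (Spec_framework_to_path_py framework_id out) := by
  unfold Spec_framework_to_path_py; infer_instance

-- ===== CLAIM (what is proved, stated in full; the proofs are below) =====
def Claim_equal_framework_to_path_py : Prop :=
  ∀ (framework_id : String), Dom_framework_to_path_py framework_id →
    Pre_framework_to_path_py framework_id →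
    Spec_framework_to_path_py framework_id (framework_to_path_py framework_id)

-- ===== LEMMAS AND PROOFS =====

-- flush a (already correctly ordered) buffer
def pvFlush (buf : List Char) : List (List Char) := if buf = [] then [] else [buf]

-- the nonempty dash-separated segments of l, with cur = reversed current segment
def pvSegs : List Char → List Char → List (List Char)
  | [], cur => pvFlush cur.reverse
  | c :: rest, cur =>
    if c = '-' then pvFlush cur.reverse ++ pvSegs rest []
    else pvSegs rest (c :: cur)

-- B's loop, written recursively
def pvBf : List Char → List (List Char) → List Char → List (List Char)
  | [], parts, buf => if buf = [] then parts else parts ++ [buf]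
  | c :: rest, parts, buf =>
    if PySem.Chars.isalnum c then pvBf rest parts (buf ++ [PySem.Chars.lowerChar c])
    else if buf = [] then pvBf rest parts [] else pvBf rest (parts ++ [buf]) []

theorem pv_lower_ne_dash (c : Char) (h : PySem.Chars.isalnum c = true) :
    PySem.Chars.lowerChar c ≠ '-' := by
  simp [PySem.Chars.isalnum, PySem.Chars.isalpha, PySem.Chars.isupper,
    PySem.Chars.islower, PySem.Chars.isdigit, Char.le_def, UInt32.le_iff_toNat_le] at h
  simp only [PySem.Chars.lowerChar, PySem.Chars.isupper]
  split_ifs with hu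
  · simp [Char.le_def, UInt32.le_iff_toNat_le] at hu
    intro he
    have h2 := congrArg Char.toNat he
    rw [Char.toNat_ofNat] at h2
    have hv : (c.toNat + 32).isValidChar := by
      unfold Nat.isValidChar; left; omega
    rw [if_pos hv] at h2
    have h3 : ('-' : Char).toNat = 45 := by decide
    omega
  · simp [Char.le_def, UInt32.le_iff_toNat_le] at hu
    intro he
    have h2 : c.toNat = 45 := by rw [he]; decide
    omega

theorem pv_go_filter (l : List Char) : ∀ (fuel : Nat) (cur : List Char)
    (acc : List (List Char)), l.length + 1 ≤ fuel →
    (PySem.Chars.splitOn.go ['-'] fuel l cur acc).filter (fun p => decide (p ≠ [])) =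
      acc.reverse.filter (fun p => decide (p ≠ [])) ++ pvSegs l cur := by
  induction l with
  | nil =>
    intro fuel cur acc hf
    match fuel, hf with
    | fuel + 1, _ =>
      rw [PySem.Chars.splitOn.go.eq_def]
      simp [pvSegs, pvFlush]
      split_ifs with h <;> simp [h]
  | cons c rest ih =>
    intro fuel cur acc hf
    match fuel, hf with
    | fuel + 1, hf =>
      rw [PySem.Chars.splitOn.go.eq_def]
      simp only []
      by_cases hc : c = '-'
      · subst hc
        have hp : List.isPrefixOf ['-'] ('-' :: rest) = true := by simp [List.isPrefixOf]
        rw [if_pos hp]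
        have h1 := ih fuel [] (cur.reverse :: acc) (by simpa using Nat.le_of_succ_le_succ hf)
        simp at h1 ⊢
        rw [h1]
        simp [pvSegs, pvFlush]
        split_ifs with h <;> simp [h]
      · have hp : List.isPrefixOf ['-'] (c :: rest) = false := by
          simp [List.isPrefixOf]; exact fun h => absurd h.symm hc
        rw [if_neg (by simp [hp])]
        rw [ih fuel (c :: cur) acc (by simpa using Nat.le_of_succ_le_succ hf)]
        simp [pvSegs, hc]

theorem pv_foldl_bf (cs : List Char) : ∀ (parts : List (List Char)) (buf : List Char),
    (let st := cs.foldl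
        (fun (st : List (List Char) × List Char) c =>
          if PySem.Chars.isalnum c then (st.1, st.2 ++ [PySem.Chars.lowerChar c])
          else if st.2 = [] then (st.1, []) else (st.1 ++ [st.2], []))
        (parts, buf)
     if st.2 = [] then st.1 else st.1 ++ [st.2]) = pvBf cs parts buf := by
  induction cs with
  | nil => intro parts buf; simp [pvBf]
  | cons c rest ih =>
    intro parts buf
    simp only [List.foldl_cons]
    by_cases hc : PySem.Chars.isalnum c
    · simpa [hc, pvBf] using ih parts (buf ++ [PySem.Chars.lowerChar c])
    · by_cases hb : buf = []
      · simpa [hc, hb, pvBf] using ih parts []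
      · simpa [hc, hb, pvBf] using ih (parts ++ [buf]) []

theorem pv_bf_segs (cs : List Char) : ∀ (parts : List (List Char)) (buf : List Char),
    pvBf cs parts buf =
      parts ++ pvSegs
        (cs.map (fun c => if PySem.Chars.isalnum c then PySem.Chars.lowerChar c else '-'))
        buf.reverse := by
  induction cs with
  | nil => intro parts buf; simp [pvBf, pvSegs, pvFlush]; split_ifs with h <;> simp
  | cons c rest ih =>
    intro parts buf
    by_cases hc : PySem.Chars.isalnum c
    · rw [pvBf, if_pos hc]
      rw [ih parts (buf ++ [PySem.Chars.lowerChar c])]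
      simp only [List.map_cons, if_pos hc, pvSegs,
        if_neg (pv_lower_ne_dash c hc), List.reverse_append, List.reverse_cons,
        List.reverse_nil, List.nil_append, List.singleton_append]
    · rw [pvBf, if_neg hc]
      simp only [List.map_cons, if_neg hc, pvSegs]
      by_cases hb : buf = []
      · subst hb
        rw [if_pos rfl, ih parts []]
        simp [pvFlush]
      · rw [if_neg hb, ih (parts ++ [buf]) []]
        simp [pvFlush, hb]

theorem pv_segs_ne_nil (l : List Char) : ∀ (cur : List Char),
    ∀ x ∈ pvSegs l cur, x ≠ [] := by
  induction l with
  | nil =>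
    intro cur x hx
    simp [pvSegs, pvFlush] at hx
    obtain ⟨h1, h2⟩ := hx; subst h2; simpa using h1
  | cons c rest ih =>
    intro cur x hx
    rw [pvSegs] at hx
    split_ifs at hx with h
    · simp [pvFlush] at hx
      rcases hx with ⟨h1, h2⟩ | hx
      · subst h2; simpa using h1
      · exact ih [] x hx
    · exact ih (c :: cur) x hx

theorem pv_join_eq_nil (parts : List (List Char)) (h : ∀ x ∈ parts, x ≠ []) :
    (PySem.Chars.join ['-'] parts = [] ↔ parts = []) := by
  cases parts with
  | nil => simp [PySem.Chars.join, List.intercalate]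
  | cons x rest =>
    simp only [PySem.Chars.join]
    constructor
    · intro hj
      cases rest with
      | nil =>
        simp [List.intercalate] at hj
        exact absurd hj (h x (by simp))
      | cons y ys => simp [List.intercalate, List.intersperse] at hj
    · intro hj; simp at hj

-- ===== VERDICT (by name: the statement is the Claim_ definition above) =====
theorem framework_to_path_py_spec : Claim_equal_framework_to_path_py := by
  intro s _ _
  unfold Spec_framework_to_path_py framework_to_path_py framework_to_path_py_alt
  have hA : ∀ ms : List Char,
      (PySem.Chars.splitOn ms ['-']).filter (fun p => decide (p ≠ [])) = pvSegs ms [] := by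
    intro ms
    unfold PySem.Chars.splitOn
    simpa using pv_go_filter ms (ms.length + 1) [] [] (Nat.le_refl _)
  simp only [hA, pv_foldl_bf, pv_bf_segs, List.reverse_nil, List.nil_append,
    pv_join_eq_nil _ (pv_segs_ne_nil _ _)]
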